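-- pv_equiv track=rewrite | github.com/Nghia03092004/nghia03092004.github.io | project_euler/problem_421/solution.py | solve_for_prime
-- ===== SOURCE A (Python) =====
-- from math import gcd
--
-- def primitive_root(p):
--     """Find a primitive root of prime p."""
--     if p == 2:
--         return 1
--     phi = p - 1
--     factors = []
--     temp = phi
--     d = 2
--     while d * d <= temp:
--         if temp % d == 0:
--             factors.append(d)
--             while temp % d == 0:
--                 temp //= d
--         d += 1
--     if temp > 1:
--         factors.append(temp)
--
--     for g in range(2, p):
--         if all(pow(g, phi // f, p) != 1 for f in factors):
--             return g
--     return -1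
--
-- def extended_gcd(a, b):
--     if b == 0:
--         return a, 1, 0
--     g, x, y = extended_gcd(b, a % b)
--     return g, y, x - (a // b) * y
--
-- def solve_for_prime(p, N):
--     """Count sum of p * f(p) where f(p) = |{n in [1,N]: p | n^15+1}|."""
--     if p == 2:
--         cnt = (N + 1) // 2
--         return 2 * cnt
--
--     pm1 = p - 1
--     g30 = gcd(30, pm1)
--     g15 = gcd(15, pm1)
--     c = g30 - g15
--
--     if c == 0:
--         return 0
--
--     g = primitive_root(p)
--     half = pm1 // 2
--
--     d = gcd(15, pm1)
--     if half % d != 0: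
--         return 0
--
--     a_coeff = 15 // d
--     b_val = half // d
--     mod_val = pm1 // d
--
--     gg, x, y = extended_gcd(a_coeff, mod_val)
--     k0 = (x * b_val) % mod_val
--
--     residues = []
--     for t in range(d):
--         k = (k0 + t * mod_val) % pm1
--         r = pow(g, k, p)
--         residues.append(r)
--     residues.sort()
--
--     full_periods = N // p
--     remainder = N % p
--
--     cnt = full_periods * c
--     for r in residues:
--         if r == 0:
--             continue
--         if r <= remainder:
--             cnt += 1
--
--     return p * cnt
-- ===== SOURCE B (Python) =====
-- from math import gcd
--
-- def _proper_divisors(n):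
--     """All divisors m of n with 1 <= m < n, by pairing m with n // m."""
--     small, large = [], []
--     i = 1
--     while i * i <= n:
--         if n % i == 0:
--             small.append(i)
--             if i != n // i:
--                 large.append(n // i)
--         i += 1
--     return [m for m in small + large[::-1] if m < n]
--
-- def _primitive_root(p):
--     """First g in [2,p) whose order mod p is p-1: no factorization — test
--     g^m != 1 for EVERY proper divisor m of p-1 (m | (p-1)/f for some prime
--     f | p-1, so this agrees with the classic prime-factor criterion)."""
--     if p == 2:
--         return 1
--     phi = p - 1
--     divs = _proper_divisors(phi)
--     for g in range(2, p):
--         if all(pow(g, m, p) != 1 for m in divs):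
--             return g
--     return -1
--
-- def solve_for_prime(p, N):
--     """Count sum of p * f(p) where f(p) = |{n in [1,N]: p | n^15+1}|."""
--     if p == 2:
--         return 2 * ((N + 1) // 2)
--     pm1 = p - 1
--     d = gcd(15, pm1)
--     c = gcd(30, pm1) - d
--     if c == 0:
--         return 0
--     half = pm1 // 2
--     if half % d:
--         return 0
--     mod_val = pm1 // d
--     k0 = pow(15 // d, -1, mod_val) * (half // d) % mod_val
--     g = _primitive_root(p)
--     remainder = N % p
--     tail = sum(1 for t in range(d)
--                if (r := pow(g, (k0 + t * mod_val) % pm1, p)) and r <= remainder)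
--     return p * ((N // p) * c + tail)
-- ===== Notes on version B (the rewrite author's own statement) =====
-- stated objective: alternative
-- what changed: B finds the primitive root with a divisor-enumeration order test (g^m != 1 for every proper divisor m of p-1, divisors collected in sqrt-paired fashion) instead of trial-division prime factorization of p-1, replaces the recursive extended-Euclid/Bezout machinery by the builtin modular inverse pow(a,-1,m), and counts matching residues in one closed-form sum without building and sorting a residue list.
import Mathlib
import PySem

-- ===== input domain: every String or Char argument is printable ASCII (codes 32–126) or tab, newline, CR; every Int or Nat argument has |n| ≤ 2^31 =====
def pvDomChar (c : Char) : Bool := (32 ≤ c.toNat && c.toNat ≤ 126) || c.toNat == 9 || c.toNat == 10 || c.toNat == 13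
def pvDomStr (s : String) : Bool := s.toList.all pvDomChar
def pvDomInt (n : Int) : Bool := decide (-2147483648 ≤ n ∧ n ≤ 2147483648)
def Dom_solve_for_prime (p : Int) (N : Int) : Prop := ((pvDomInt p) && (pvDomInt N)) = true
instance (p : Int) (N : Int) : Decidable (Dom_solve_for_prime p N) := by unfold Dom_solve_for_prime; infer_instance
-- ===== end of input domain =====

-- B finds the primitive root by a divisor-enumeration order test (no factorization), uses the
-- builtin modular inverse instead of the Bezout recursion and a closed-form count instead of
-- sort-and-scan: an alternative algorithm with the same return value.


-- ===== PORT A =====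

-- shared helper: Python's built-in pow(b, e, m).  Exact for 0 ≤ e; for e < 0 CPython first inverts
-- b mod m (here via the Bézout coefficient Int.gcdA), exact whenever gcd(b, m) = 1 — the only case
-- either program reaches (Python raises ValueError otherwise).
-- an integer division by b ≥ 2 strictly shrinks a positive integer (cited by termination proofs)
theorem int_div_lt_self {a b : Int} (h0 : 0 < a) (h1 : 1 < b) : a / b < a := by
  have h := Int.mul_ediv_add_emod a b
  have hnn : 0 ≤ a / b := Int.ediv_nonneg (le_of_lt h0) (by omega)
  have hmod : 0 ≤ a % b := Int.emod_nonneg a (by omega)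
  nlinarith

-- CPython's square-and-multiply modular exponentiation (binPowMod_eq below proves it equal
-- to PySem.Int.powMod, i.e. to (b ^ e) mod m)
def binPowMod (b : Int) (e : Nat) (m : Int) : Int :=
  if h : e = 0 then PySem.Int.mod 1 m
  else
    let hf := binPowMod b (e / 2) m
    if e % 2 = 0 then PySem.Int.mod (hf * hf) m
    else PySem.Int.mod (hf * hf * PySem.Int.mod b m) m
termination_by e
decreasing_by exact Nat.div_lt_self (Nat.pos_of_ne_zero h) one_lt_two

def pyPowMod (b e m : Int) : Int :=
  if 0 ≤ e then binPowMod b e.toNat m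
  else binPowMod (PySem.Int.mod (Int.gcdA b m) m) (-e).toNat m

-- shared helper: the inner 'while temp % d == 0: temp //= d' of both programs' loops
-- ('2 ≤ d ∧ 0 < t' is a totality guard only; it holds at every executed call)
-- cited by pyDivOut's termination proof
theorem dec_pyDivOut (t d : Int) (h : 2 ≤ d ∧ 0 < t ∧ PySem.Int.mod t d = 0) :
    (PySem.Int.floordiv t d).toNat < t.toNat := by
  have h1 : PySem.Int.floordiv t d = t / d := PySem.Int.floordiv_eq_ediv_of_pos (by omega)
  have h2 : t / d < t := int_div_lt_self h.2.1 (by omega)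
  have h3 : 0 ≤ t / d := Int.ediv_nonneg (by omega) (by omega)
  omega

def pyDivOut (t d : Int) : Int :=
  if h : 2 ≤ d ∧ 0 < t ∧ PySem.Int.mod t d = 0 then pyDivOut (PySem.Int.floordiv t d) d else t
termination_by t.toNat
decreasing_by exact dec_pyDivOut t d h

-- bounds on pyDivOut, cited by the termination proof of A's factor loop
theorem pyDivOut_bounds (t d : Int) (ht : 0 ≤ t) : 0 ≤ pyDivOut t d ∧ pyDivOut t d ≤ t := by
  revert ht
  induction t using pyDivOut.induct (d := d) with
  | case1 x hx ih =>
      intro ht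
      rw [pyDivOut, dif_pos hx]
      have h1 : PySem.Int.floordiv x d = x / d := PySem.Int.floordiv_eq_ediv_of_pos (by omega)
      have h2 : x / d < x := int_div_lt_self hx.2.1 (by omega)
      have h3 : 0 ≤ x / d := Int.ediv_nonneg (by omega) (by omega)
      have := ih (by omega)
      omega
  | case2 x hx =>
      intro ht
      rw [pyDivOut, dif_neg hx]
      omega

theorem pyDivOut_lt (t d : Int) (hd : 2 ≤ d) (ht : 0 < t) (hm : PySem.Int.mod t d = 0) :
    pyDivOut t d < t := by
  rw [pyDivOut, dif_pos ⟨hd, ht, hm⟩]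
  have h1 : PySem.Int.floordiv t d = t / d := PySem.Int.floordiv_eq_ediv_of_pos (by omega)
  have h2 : t / d < t := int_div_lt_self ht (by omega)
  have h3 : 0 ≤ t / d := Int.ediv_nonneg (by omega) (by omega)
  have := pyDivOut_bounds (PySem.Int.floordiv t d) d (by omega)
  omega

-- A's factor loop 'while d * d <= temp: if temp % d == 0: append d; divide out; d += 1'
-- ('2 ≤ d' is a totality guard only; d starts at 2 and increases)
-- cited by factorA's termination proof
theorem dec_factor1 (temp d : Int) (h : d * d ≤ temp ∧ 2 ≤ d)
    (hm : PySem.Int.mod temp d = 0) :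
    (pyDivOut temp d).toNat + ((pyDivOut temp d).toNat + 2 - (d + 1).toNat)
      < temp.toNat + (temp.toNat + 2 - d.toNat) := by
  have hd : 2 ≤ d := h.2
  have ht : 4 ≤ temp := by nlinarith [h.1]
  have h4 := pyDivOut_lt temp d hd (by omega) hm
  have h5 := (pyDivOut_bounds temp d (by omega)).1
  omega

theorem dec_factor2 (temp d : Int) (h : d * d ≤ temp ∧ 2 ≤ d) :
    temp.toNat + (temp.toNat + 2 - (d + 1).toNat) < temp.toNat + (temp.toNat + 2 - d.toNat) := by
  have hd : 2 ≤ d := h.2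
  have hdt : d ≤ temp := by nlinarith [h.1]
  omega

def factorA (temp d : Int) : Int × List Int :=
  if h : d * d ≤ temp ∧ 2 ≤ d then
    if hm : PySem.Int.mod temp d = 0 then
      let r := factorA (pyDivOut temp d) (d + 1)
      (r.1, d :: r.2)
    else factorA temp (d + 1)
  else (temp, [])
termination_by temp.toNat + (temp.toNat + 2 - d.toNat)
decreasing_by
  · exact dec_factor1 temp d h hm
  · exact dec_factor2 temp d h

-- A's search 'for g in range(2, p): if all(pow(g, phi // f, p) != 1 for f in factors): return g'
-- (the for-over-range is the counting loop itself; no list is materialized)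
def searchA (phi p : Int) (factors : List Int) (g : Int) : Int :=
  if g < p then
    if factors.all (fun f => decide (pyPowMod g (PySem.Int.floordiv phi f) p ≠ 1)) then g
    else searchA phi p factors (g + 1)
  else -1
termination_by (p - g).toNat
decreasing_by omega

def primitive_root (p : Int) : Int :=
  if p = 2 then 1
  else
    let phi := p - 1
    let fr := factorA phi 2
    let factors := if fr.1 > 1 then fr.2 ++ [fr.1] else fr.2
    searchA phi p factors 2

-- cited by extended_gcd's termination proof
theorem dec_extended_gcd (a b : Int) (hb : ¬ b = 0) :
    (PySem.Int.mod a b).natAbs < b.natAbs := by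
  rcases lt_or_gt_of_ne hb with hneg | hpos
  · have := PySem.Int.mod_neg_bounds a hneg; omega
  · have h1 := PySem.Int.mod_nonneg a hpos
    have h2 := PySem.Int.mod_lt a hpos
    omega

def extended_gcd (a b : Int) : Int × Int × Int :=
  if hb : b = 0 then (a, 1, 0)
  else
    ((extended_gcd b (PySem.Int.mod a b)).1,
     (extended_gcd b (PySem.Int.mod a b)).2.2,
     (extended_gcd b (PySem.Int.mod a b)).2.1
       - PySem.Int.floordiv a b * (extended_gcd b (PySem.Int.mod a b)).2.2)
termination_by b.natAbs
decreasing_by exact dec_extended_gcd a b hb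

def solve_for_prime (p : Int) (N : Int) : Int :=
  if p = 2 then 2 * PySem.Int.floordiv (N + 1) 2
  else
    let pm1 := p - 1
    let g30 : Int := Int.gcd 30 pm1
    let g15 : Int := Int.gcd 15 pm1
    let c := g30 - g15
    if c = 0 then 0
    else
      let g := primitive_root p
      let half := PySem.Int.floordiv pm1 2
      let d : Int := Int.gcd 15 pm1
      if PySem.Int.mod half d ≠ 0 then 0
      else
        let a_coeff := PySem.Int.floordiv 15 d
        let b_val := PySem.Int.floordiv half d
        let mod_val := PySem.Int.floordiv pm1 d
        let eg := extended_gcd a_coeff mod_val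
        let k0 := PySem.Int.mod (eg.2.1 * b_val) mod_val
        let residues := (PySem.List.pyRange 0 d 1).foldl
          (fun acc t => acc ++ [pyPowMod g (PySem.Int.mod (k0 + t * mod_val) pm1) p]) []
        let residues' := PySem.List.sorted residues (fun x => x) false
        let full_periods := PySem.Int.floordiv N p
        let remainder := PySem.Int.mod N p
        let cnt := residues'.foldl
          (fun cnt r => if r = 0 then cnt else if r ≤ remainder then cnt + 1 else cnt)
          (full_periods * c)
        p * cnt

-- ===== PORT B =====

-- cited by divLoop's termination proof
theorem dec_divLoop (n i : Int) (h : i * i ≤ n ∧ 1 ≤ i) :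
    n.toNat + 1 - (i + 1).toNat < n.toNat + 1 - i.toNat := by
  have h1 : i ≤ n := by nlinarith [h.1, h.2]
  omega

-- B's divisor loop 'while i*i <= n: if n % i == 0: small.append(i); maybe large.append(n//i)'
def divLoop (n i : Int) (small large : List Int) : List Int × List Int :=
  if h : i * i ≤ n ∧ 1 ≤ i then
    if PySem.Int.mod n i = 0 then
      divLoop n (i + 1) (small ++ [i])
        (if i ≠ PySem.Int.floordiv n i then large ++ [PySem.Int.floordiv n i] else large)
    else divLoop n (i + 1) small large
  else (small, large)
termination_by n.toNat + 1 - i.toNat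
decreasing_by all_goals exact dec_divLoop n i h

def proper_divisors (n : Int) : List Int :=
  let r := divLoop n 1 [] []
  (r.1 ++ r.2.reverse).filter (fun m => decide (m < n))

-- B's search 'next((g for g in range(2, p) if all(pow(g, m, p) != 1 for m in divs)), -1)'
def searchB (p : Int) (divs : List Int) (g : Int) : Int :=
  if g < p then
    if divs.all (fun m => decide (pyPowMod g m p ≠ 1)) then g
    else searchB p divs (g + 1)
  else -1
termination_by (p - g).toNat
decreasing_by omega

def primitive_root_alt (p : Int) : Int :=
  if p = 2 then 1
  else
    let phi := p - 1
    let divs := proper_divisors phi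
    searchB p divs 2

def solve_for_prime_alt (p : Int) (N : Int) : Int :=
  if p = 2 then 2 * PySem.Int.floordiv (N + 1) 2
  else
    let pm1 := p - 1
    let d : Int := Int.gcd 15 pm1
    let c : Int := (Int.gcd 30 pm1 : Int) - d
    if c = 0 then 0
    else
      let half := PySem.Int.floordiv pm1 2
      if PySem.Int.mod half d ≠ 0 then 0
      else
        let mod_val := PySem.Int.floordiv pm1 d
        let k0 := PySem.Int.mod
          (pyPowMod (PySem.Int.floordiv 15 d) (-1) mod_val * PySem.Int.floordiv half d) mod_val
        let g := primitive_root_alt p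
        let remainder := PySem.Int.mod N p
        let tail : Int := ((PySem.List.pyRange 0 d 1).map
            (fun t => pyPowMod g (PySem.Int.mod (k0 + t * mod_val) pm1) p)).countP
          (fun r => decide (r ≠ 0 ∧ r ≤ remainder))
        p * (PySem.Int.floordiv N p * c + tail)

-- ===== PRECONDITION & SPEC =====
-- Pre_ excludes only p = 1, where A raises ZeroDivisionError (modulo by zero) and B raises ValueError.
def Pre_solve_for_prime (p : Int) (N : Int) : Prop := p ≠ 1
instance (p : Int) (N : Int) : Decidable (Pre_solve_for_prime p N) := by
  unfold Pre_solve_for_prime; infer_instance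
def pvWitness_solve_for_prime : Int × Int := (7, 10)

def Spec_solve_for_prime (p : Int) (N : Int) (out : Int) : Prop := out = solve_for_prime_alt p N
instance (p : Int) (N : Int) (out : Int) : Decidable (Spec_solve_for_prime p N out) := by
  unfold Spec_solve_for_prime; infer_instance

-- ===== CLAIM (what is proved, stated in full; the proofs are below) =====
def Claim_equal_solve_for_prime : Prop := ∀ (p : Int) (N : Int), Dom_solve_for_prime p N →
  Pre_solve_for_prime p N → Spec_solve_for_prime p N (solve_for_prime p N)

-- ===== LEMMAS AND PROOFS =====

theorem mod_congr (u v m : Int) (h : m ∣ (u - v)) : PySem.Int.mod u m = PySem.Int.mod v m := by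
  rcases eq_or_ne m 0 with rfl | hm
  · obtain rfl : u = v := by have := zero_dvd_iff.mp h; omega
    rfl
  · have hu := PySem.Int.floordiv_mul_add_mod u m
    have hv := PySem.Int.floordiv_mul_add_mod v m
    obtain ⟨c, hc⟩ := h
    have key : PySem.Int.mod u m - PySem.Int.mod v m
        = m * (c - PySem.Int.floordiv u m + PySem.Int.floordiv v m) := by linear_combination hc + hu - hv
    set q := c - PySem.Int.floordiv u m + PySem.Int.floordiv v m with hq
    rcases lt_or_gt_of_ne hm with hneg | hpos
    · have b1 := PySem.Int.mod_neg_bounds u hneg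
      have b2 := PySem.Int.mod_neg_bounds v hneg
      have hq0 : q = 0 := by
        rcases lt_trichotomy q 0 with h | h | h
        · nlinarith
        · exact h
        · nlinarith
      rw [hq0, mul_zero] at key; omega
    · have b11 := PySem.Int.mod_nonneg u hpos
      have b12 := PySem.Int.mod_lt u hpos
      have b21 := PySem.Int.mod_nonneg v hpos
      have b22 := PySem.Int.mod_lt v hpos
      have hq0 : q = 0 := by
        rcases lt_trichotomy q 0 with h | h | h
        · nlinarith
        · exact h
        · nlinarith
      rw [hq0, mul_zero] at key; omega

theorem mod_sub_self_dvd (w m : Int) : m ∣ (w - PySem.Int.mod w m) := by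
  have h := PySem.Int.floordiv_mul_add_mod w m
  exact ⟨PySem.Int.floordiv w m, by linear_combination -h⟩

theorem mod_sub_dvd (w m : Int) : m ∣ (PySem.Int.mod w m - w) := by
  have h := PySem.Int.floordiv_mul_add_mod w m
  exact ⟨-(PySem.Int.floordiv w m), by linear_combination h⟩

-- if g^a ≡ 1 (mod p) and a ∣ e (0 ≤ a ≤ e) then g^e ≡ 1 (mod p)
theorem dvdMulSubMul (m x x' y y' : Int) (h1 : m ∣ x - x') (h2 : m ∣ y - y') :
    m ∣ x * y - x' * y' := by
  have heq : x * y - x' * y' = (x - x') * y + x' * (y - y') := by ring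
  rw [heq]
  exact dvd_add (h1.mul_right y) (h2.mul_left x')

theorem binPowMod_eq (b : Int) (e : Nat) (m : Int) :
    binPowMod b e m = PySem.Int.powMod b e m := by
  induction e using binPowMod.induct (b := b) (m := m) with
  | case1 =>
      rw [binPowMod, dif_pos rfl, PySem.Int.powMod, pow_zero]
  | case2 e h hpar ih =>
      rw [binPowMod, dif_neg h]
      simp only [if_pos hpar]
      have hdvd : m ∣ (binPowMod b (e / 2) m - b ^ (e / 2)) := by
        rw [ih, PySem.Int.powMod]
        exact mod_sub_dvd _ _
      rw [PySem.Int.powMod]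
      have he : e = e / 2 + e / 2 := by omega
      rw [show b ^ e = b ^ (e / 2) * b ^ (e / 2) by rw [← pow_add, ← he]]
      exact mod_congr _ _ m (dvdMulSubMul m _ _ _ _ hdvd hdvd)
  | case3 e h hpar ih =>
      rw [binPowMod, dif_neg h]
      simp only [if_neg hpar]
      have hdvd : m ∣ (binPowMod b (e / 2) m - b ^ (e / 2)) := by
        rw [ih, PySem.Int.powMod]
        exact mod_sub_dvd _ _
      rw [PySem.Int.powMod]
      have he : e = e / 2 + e / 2 + 1 := by omega
      rw [show b ^ e = b ^ (e / 2) * b ^ (e / 2) * b by rw [← pow_add, ← pow_succ, ← he]]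
      exact mod_congr _ _ m (dvdMulSubMul m _ _ _ _
        (dvdMulSubMul m _ _ _ _ hdvd hdvd) (mod_sub_dvd b m))

theorem search_eq (phi p : Int) (fs divs : List Int)
    (hpred : ∀ g : Int, fs.all (fun f => decide (pyPowMod g (PySem.Int.floordiv phi f) p ≠ 1))
      = divs.all (fun m => decide (pyPowMod g m p ≠ 1))) :
    ∀ g : Int, searchA phi p fs g = searchB p divs g := by
  intro g
  induction g using searchA.induct (phi := phi) (p := p) (factors := fs) with
  | case1 g hg htest =>
      rw [searchA, if_pos hg, if_pos htest, searchB, if_pos hg, ← hpred, if_pos htest]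
  | case2 g hg htest ih =>
      rw [searchA, if_pos hg, if_neg htest, searchB, if_pos hg, ← hpred, if_neg htest, ih]
  | case3 g hg =>
      rw [searchA, if_neg hg, searchB, if_neg hg]

theorem pyDivOut_pos (t d : Int) (ht : 0 < t) : 0 < pyDivOut t d := by
  revert ht
  induction t using pyDivOut.induct (d := d) with
  | case1 x hx ih =>
      intro ht
      rw [pyDivOut, dif_pos hx]
      have hdvd : d ∣ x := (PySem.Int.mod_eq_zero_iff_dvd x d).mp hx.2.2
      have h1 : PySem.Int.floordiv x d = x / d := PySem.Int.floordiv_eq_ediv_of_pos (by omega)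
      have hpos : 0 < x / d := by
        rcases hdvd with ⟨k, hk⟩
        have hk' : x / d = k := by rw [hk]; exact Int.mul_ediv_cancel_left k (by omega)
        nlinarith
      exact ih (by omega)
  | case2 x hx => intro ht; rw [pyDivOut, dif_neg hx]; omega

theorem pyDivOut_dvd (t d : Int) (ht : 0 < t) : pyDivOut t d ∣ t := by
  revert ht
  induction t using pyDivOut.induct (d := d) with
  | case1 x hx ih =>
      intro ht
      rw [pyDivOut, dif_pos hx]
      have hdvd : d ∣ x := (PySem.Int.mod_eq_zero_iff_dvd x d).mp hx.2.2
      have h1 : PySem.Int.floordiv x d = x / d := PySem.Int.floordiv_eq_ediv_of_pos (by omega)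
      have hpos : 0 < x / d := by
        rcases hdvd with ⟨k, hk⟩
        have hk' : x / d = k := by rw [hk]; exact Int.mul_ediv_cancel_left k (by omega)
        nlinarith
      have h2 : x / d ∣ x := ⟨d, (Int.ediv_mul_cancel hdvd).symm⟩
      calc pyDivOut (PySem.Int.floordiv x d) d ∣ PySem.Int.floordiv x d := ih (by omega)
        _ ∣ x := by rw [h1]; exact h2
  | case2 x hx => intro _; rw [pyDivOut, dif_neg hx]

theorem pyDivOut_not_dvd (t d : Int) (hd : 2 ≤ d) (ht : 0 < t) : ¬ d ∣ pyDivOut t d := by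
  revert ht
  induction t using pyDivOut.induct (d := d) with
  | case1 x hx ih =>
      intro ht
      rw [pyDivOut, dif_pos hx]
      have hdvd : d ∣ x := (PySem.Int.mod_eq_zero_iff_dvd x d).mp hx.2.2
      have h1 : PySem.Int.floordiv x d = x / d := PySem.Int.floordiv_eq_ediv_of_pos (by omega)
      have hpos : 0 < x / d := by
        rcases hdvd with ⟨k, hk⟩
        have hk' : x / d = k := by rw [hk]; exact Int.mul_ediv_cancel_left k (by omega)
        nlinarith
      exact ih (by omega)
  | case2 x hx =>
      intro ht
      rw [pyDivOut, dif_neg hx]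
      intro hdvd
      exact hx ⟨hd, ht, (PySem.Int.mod_eq_zero_iff_dvd x d).mpr hdvd⟩

-- dividing out d keeps divisibility by any other (positive) prime
theorem pyDivOut_prime_dvd (t d q : Int) (hq : Prime q) (hqt : q ∣ t) (hqd : ¬ q ∣ d) :
    q ∣ pyDivOut t d := by
  revert hqt
  induction t using pyDivOut.induct (d := d) with
  | case1 x hx ih =>
      intro hqx
      rw [pyDivOut, dif_pos hx]
      have hdvd : d ∣ x := (PySem.Int.mod_eq_zero_iff_dvd x d).mp hx.2.2
      have h1 : PySem.Int.floordiv x d = x / d := PySem.Int.floordiv_eq_ediv_of_pos (by omega)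
      apply ih
      rw [h1]
      have hx' : x = (x / d) * d := (Int.ediv_mul_cancel hdvd).symm
      have : q ∣ (x / d) * d := by rw [← hx']; exact hqx
      rcases hq.dvd_mul.mp this with h | h
      · exact h
      · exact absurd h hqd
  | case2 x hx => intro hqx; rw [pyDivOut, dif_neg hx]; exact hqx

-- a minimal divisor ≥ 2 is prime
theorem prime_of_min_divisor (d temp : Int) (hd : 2 ≤ d) (hdvd : d ∣ temp) (ht : 0 < temp)
    (hmin : ∀ e, 2 ≤ e → e < d → ¬ e ∣ temp) : Prime d := by
  rw [Int.prime_iff_natAbs_prime]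
  rw [Nat.prime_def_lt]
  constructor
  · omega
  · intro m hm hmd
    by_contra hm1
    have hm0 : m ≠ 0 := by
      intro h0; rw [h0] at hmd; have := Nat.eq_zero_of_zero_dvd hmd; omega
    have hm2 : 2 ≤ m := by omega
    have h1 : (m : Int) ∣ d := by
      have : (m : Int) ∣ (d.natAbs : Int) := Int.natCast_dvd_natCast.mpr hmd
      rwa [Int.natAbs_of_nonneg (by omega)] at this
    exact hmin m (by exact_mod_cast hm2) (by omega) (h1.trans hdvd)

-- soundness of A's factor collection: every listed factor (and the residual) divides temp
theorem factorA_sound (temp d : Int) : 0 < temp → 2 ≤ d →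
    (∀ f ∈ (factorA temp d).2, 2 ≤ f ∧ f ∣ temp) ∧
      ((factorA temp d).1 ∣ temp ∧ 0 < (factorA temp d).1) := by
  induction temp, d using factorA.induct with
  | case1 temp d h hm ih =>
      intro ht hd
      rw [factorA, dif_pos h, dif_pos hm]
      have hpos : 0 < pyDivOut temp d := pyDivOut_pos temp d ht
      have hdvd1 : pyDivOut temp d ∣ temp := pyDivOut_dvd temp d ht
      have := ih hpos (by omega)
      refine ⟨?_, this.2.1.trans hdvd1, this.2.2⟩
      intro f hf
      rcases List.mem_cons.mp hf with rfl | hf'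
      · exact ⟨hd, (PySem.Int.mod_eq_zero_iff_dvd temp f).mp hm⟩
      · exact ⟨(this.1 f hf').1, (this.1 f hf').2.trans hdvd1⟩
  | case2 temp d h hm ih =>
      intro ht hd
      rw [factorA, dif_pos h, dif_neg hm]
      exact ih ht (by omega)
  | case3 temp d h =>
      intro ht hd
      rw [factorA, dif_neg h]
      exact ⟨by simp, dvd_refl temp, ht⟩

-- completeness: every positive prime divisor of temp appears in the list or as the residual
theorem factorA_complete (temp d : Int) : ∀ q : Int, 0 < temp → 2 ≤ d →
    (∀ e, 2 ≤ e → e < d → ¬ e ∣ temp) → 2 ≤ q → Prime q → q ∣ temp →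
    q ∈ (factorA temp d).2 ∨ q = (factorA temp d).1 := by
  induction temp, d using factorA.induct with
  | case1 temp d h hm ih =>
      intro q ht hd hmin hq2 hq hqt
      rw [factorA, dif_pos h, dif_pos hm]
      by_cases hqd : q = d
      · exact Or.inl (by simp [hqd])
      · have hddvd : d ∣ temp := (PySem.Int.mod_eq_zero_iff_dvd temp d).mp hm
        have hdprime : Prime d := prime_of_min_divisor d temp hd hddvd ht hmin
        have hnd : ¬ q ∣ d := by
          intro hdvd
          have h1 : q.natAbs ∣ d.natAbs := Int.natAbs_dvd_natAbs.mpr hdvd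
          have h2 : d.natAbs.Prime := Int.prime_iff_natAbs_prime.mp hdprime
          rcases (Nat.Prime.eq_one_or_self_of_dvd h2 _ h1) with h3 | h3
          · omega
          · apply hqd; omega
        have hqdiv : q ∣ pyDivOut temp d := pyDivOut_prime_dvd temp d q hq hqt hnd
        have hpos : 0 < pyDivOut temp d := pyDivOut_pos temp d ht
        have hmin' : ∀ e, 2 ≤ e → e < d + 1 → ¬ e ∣ pyDivOut temp d := by
          intro e he1 he2 hedvd
          by_cases hed : e = d
          · exact pyDivOut_not_dvd temp d hd ht (hed ▸ hedvd)
          · exact hmin e he1 (by omega) (hedvd.trans (pyDivOut_dvd temp d ht))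
        rcases ih q hpos (by omega) hmin' hq2 hq hqdiv with h1 | h1
        · exact Or.inl (List.mem_cons_of_mem d h1)
        · exact Or.inr h1
  | case2 temp d h hm ih =>
      intro q ht hd hmin hq2 hq hqt
      rw [factorA, dif_pos h, dif_neg hm]
      have hmin' : ∀ e, 2 ≤ e → e < d + 1 → ¬ e ∣ temp := by
        intro e he1 he2 hedvd
        by_cases hed : e = d
        · exact hm ((PySem.Int.mod_eq_zero_iff_dvd temp d).mpr (hed ▸ hedvd))
        · exact hmin e he1 (by omega) hedvd
      exact ih q ht (by omega) hmin' hq2 hq hqt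
  | case3 temp d h =>
      intro q ht hd hmin hq2 hq hqt
      rw [factorA, dif_neg h]
      have hdd : ¬ d * d ≤ temp := by
        intro hc; exact h ⟨hc, hd⟩
      have hqd : d ≤ q := by
        by_contra hlt
        exact hmin q hq2 (by omega) hqt
      rcases hqt with ⟨s, hs⟩
      have hs1 : 1 ≤ s := by nlinarith
      by_cases hs2 : s = 1
      · right; rw [hs, hs2]; ring
      · exfalso
        have hs3 : 2 ≤ s := by omega
        set r : Int := (s.natAbs.minFac : Int) with hr
        have hsabs : 2 ≤ s.natAbs := by omega
        have hrprime : s.natAbs.minFac.Prime := Nat.minFac_prime (by omega)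
        have hr2 : 2 ≤ r := by rw [hr]; exact_mod_cast hrprime.two_le
        have hrs : r ∣ s := by
          have : (s.natAbs.minFac : Int) ∣ (s.natAbs : Int) :=
            Int.natCast_dvd_natCast.mpr (Nat.minFac_dvd _)
          rwa [Int.natAbs_of_nonneg (by omega)] at this
        have hrtemp : r ∣ temp := hs ▸ (hrs.mul_left q)
        have hrd : d ≤ r := by
          by_contra hlt
          exact hmin r hr2 (by omega) hrtemp
        have hrles : r ≤ s := Int.le_of_dvd (by omega) hrs
        nlinarith

-- membership in B's two divisor lists
theorem divLoop_mem (n i : Int) (small large : List Int) : 1 ≤ i → ∀ x : Int,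
    ((x ∈ (divLoop n i small large).1 ∨ x ∈ (divLoop n i small large).2) ↔
      (x ∈ small ∨ x ∈ large) ∨ ∃ j, i ≤ j ∧ j * j ≤ n ∧ PySem.Int.mod n j = 0 ∧
        (x = j ∨ (x = PySem.Int.floordiv n j ∧ j ≠ PySem.Int.floordiv n j))) := by
  induction i, small, large using divLoop.induct (n := n) with
  | case1 i small large h hm ih =>
      intro hi x
      rw [divLoop, dif_pos h, if_pos hm]
      have hsplit : ∀ P : Int → Prop, (∃ j, i ≤ j ∧ P j) ↔ (P i ∨ ∃ j, i + 1 ≤ j ∧ P j) := by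
        intro P
        constructor
        · rintro ⟨j, hj1, hj2⟩
          by_cases hji : j = i
          · exact Or.inl (hji ▸ hj2)
          · exact Or.inr ⟨j, by omega, hj2⟩
        · rintro (hP | ⟨j, hj1, hj2⟩)
          · exact ⟨i, le_refl i, hP⟩
          · exact ⟨j, by omega, hj2⟩
      rw [hsplit]
      by_cases hne : i ≠ PySem.Int.floordiv n i
      · have ih' := ih (by omega) x
        rw [dif_pos hne] at ih'
        rw [if_pos hne, ih']
        simp only [List.mem_append, List.mem_singleton]
        constructor
        · rintro (((hs | rfl) | (hl | rfl)) | hr)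
          · exact Or.inl (Or.inl hs)
          · exact Or.inr (Or.inl ⟨h.1, hm, Or.inl rfl⟩)
          · exact Or.inl (Or.inr hl)
          · exact Or.inr (Or.inl ⟨h.1, hm, Or.inr ⟨rfl, hne⟩⟩)
          · exact Or.inr (Or.inr hr)
        · rintro ((hs | hl) | ⟨_, _, (rfl | ⟨rfl, _⟩)⟩ | hr)
          · exact Or.inl (Or.inl (Or.inl hs))
          · exact Or.inl (Or.inr (Or.inl hl))
          · exact Or.inl (Or.inl (Or.inr rfl))
          · exact Or.inl (Or.inr (Or.inr rfl))
          · exact Or.inr hr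
      · have ih' := ih (by omega) x
        rw [dif_neg hne] at ih'
        rw [if_neg hne, ih']
        push_neg at hne
        simp only [List.mem_append, List.mem_singleton]
        constructor
        · rintro (((hs | rfl) | hl) | hr)
          · exact Or.inl (Or.inl hs)
          · exact Or.inr (Or.inl ⟨h.1, hm, Or.inl rfl⟩)
          · exact Or.inl (Or.inr hl)
          · exact Or.inr (Or.inr hr)
        · rintro ((hs | hl) | ⟨_, _, (rfl | ⟨rfl, hne'⟩)⟩ | hr)
          · exact Or.inl (Or.inl (Or.inl hs))
          · exact Or.inl (Or.inr hl)
          · exact Or.inl (Or.inl (Or.inr rfl))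
          · exact absurd hne hne'
          · exact Or.inr hr
  | case2 i small large h hm ih =>
      intro hi x
      rw [divLoop, dif_pos h, if_neg hm]
      rw [ih (by omega) x]
      constructor
      · rintro (hsl | ⟨j, hj1, hj2⟩)
        · exact Or.inl hsl
        · exact Or.inr ⟨j, by omega, hj2⟩
      · rintro (hsl | ⟨j, hj1, hj2, hj3, hx⟩)
        · exact Or.inl hsl
        · have hji : j ≠ i := by rintro rfl; exact hm hj3
          exact Or.inr ⟨j, by omega, hj2, hj3, hx⟩
  | case3 i small large h =>
      intro hi x
      rw [divLoop, dif_neg h]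
      constructor
      · intro hsl; exact Or.inl hsl
      · rintro (hsl | ⟨j, hj1, hj2, _⟩)
        · exact hsl
        · exfalso
          have : ¬ i * i ≤ n := fun hc => h ⟨hc, hi⟩
          nlinarith

theorem proper_divisors_mem (n : Int) (hn : 1 ≤ n) (x : Int) :
    x ∈ proper_divisors n ↔ (1 ≤ x ∧ x < n ∧ x ∣ n) := by
  unfold proper_divisors
  rw [List.mem_filter]
  simp only [decide_eq_true_eq]
  rw [show (x ∈ ((divLoop n 1 [] []).1 ++ (divLoop n 1 [] []).2.reverse)) ↔
      (x ∈ (divLoop n 1 [] []).1 ∨ x ∈ (divLoop n 1 [] []).2) by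
    rw [List.mem_append, List.mem_reverse]]
  rw [divLoop_mem n 1 [] [] (le_refl 1) x]
  simp only [List.not_mem_nil, or_self, false_or]
  constructor
  · rintro ⟨⟨j, hj1, hj2, hj3, hx⟩, hlt⟩
    have hjd : j ∣ n := (PySem.Int.mod_eq_zero_iff_dvd n j).mp hj3
    have hfd : PySem.Int.floordiv n j = n / j := PySem.Int.floordiv_eq_ediv_of_pos (by omega)
    rcases hx with rfl | ⟨rfl, _⟩
    · exact ⟨hj1, hlt, hjd⟩
    · refine ⟨?_, hlt, ?_⟩
      · rw [hfd]
        have hjn : j ≤ n := by nlinarith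
        have hmul : n / j * j = n := Int.ediv_mul_cancel hjd
        by_contra hle
        nlinarith [hmul]
      · rw [hfd]
        exact ⟨j, (Int.ediv_mul_cancel hjd).symm⟩
  · rintro ⟨hx1, hx2, hx3⟩
    refine ⟨?_, hx2⟩
    by_cases hsq : x * x ≤ n
    · exact ⟨x, hx1, hsq, (PySem.Int.mod_eq_zero_iff_dvd n x).mpr hx3, Or.inl rfl⟩
    · set j : Int := n / x with hj
      have hmul : j * x = n := Int.ediv_mul_cancel hx3
      have hj1 : 1 ≤ j := by nlinarith
      have hjx : j < x := by nlinarith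
      have hfd : PySem.Int.floordiv n j = n / j := PySem.Int.floordiv_eq_ediv_of_pos (by omega)
      have hnj : n / j = x := by
        rw [← hmul, mul_comm]
        exact Int.mul_ediv_cancel x (by omega)
      refine ⟨j, hj1, by nlinarith, (PySem.Int.mod_eq_zero_iff_dvd n j).mpr ⟨x, by omega⟩, ?_⟩
      exact Or.inr ⟨by rw [hfd, hnj], by rw [hfd, hnj]; omega⟩

-- 1 % p = 1 for p ≥ 2
theorem mod_one_eq (p : Int) (hp : 2 ≤ p) : PySem.Int.mod 1 p = 1 := by
  have h1 := PySem.Int.mod_nonneg 1 (by omega : (0:Int) < p)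
  have h2 := PySem.Int.mod_lt 1 (by omega : (0:Int) < p)
  have h3 := PySem.Int.floordiv_mul_add_mod 1 p
  set q := PySem.Int.floordiv 1 p
  rcases lt_trichotomy q 0 with h | h | h
  · nlinarith
  · rw [h, zero_mul, zero_add] at h3
    exact h3
  · nlinarith

-- mod w p = mod v p when p divides w - v
theorem powMod_one_of_dvd (g p a e : Int) (hp : 2 ≤ p) (ha : 0 ≤ a) (he : 0 ≤ e)
    (hae : a ∣ e) (h1 : PySem.Int.mod (g ^ a.toNat) p = 1) :
    PySem.Int.mod (g ^ e.toNat) p = 1 := by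
  rcases hae with ⟨k, hk⟩
  by_cases ha0 : a = 0
  · have he0 : e = 0 := by rw [hk, ha0]; ring
    subst ha0
    subst he0
    exact h1
  · have hapos : 0 < a := by omega
    have hk0 : 0 ≤ k := by
      by_contra hneg
      push_neg at hneg
      nlinarith
    have hcast : ((a.toNat * k.toNat : Nat) : Int) = e := by
      push_cast [Int.toNat_of_nonneg ha, Int.toNat_of_nonneg hk0]
      linarith [hk]
    have htn : e.toNat = a.toNat * k.toNat := by
      apply Int.natCast_inj.mp
      rw [Int.toNat_of_nonneg he, hcast]
    have hdvd1 : p ∣ g ^ a.toNat - 1 := by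
      have := mod_sub_self_dvd (g ^ a.toNat) p
      rwa [h1] at this
    have hdvd2 : (g ^ a.toNat - 1) ∣ (g ^ a.toNat) ^ k.toNat - 1 := by
      have := sub_dvd_pow_sub_pow (g ^ a.toNat) 1 k.toNat
      rwa [one_pow] at this
    have hdvd3 : p ∣ g ^ e.toNat - 1 := by
      rw [htn, pow_mul]
      exact hdvd1.trans hdvd2
    calc PySem.Int.mod (g ^ e.toNat) p = PySem.Int.mod 1 p := mod_congr _ _ p hdvd3
      _ = 1 := mod_one_eq p hp

-- the pointwise equality of A's prime-factor test and B's proper-divisor test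
theorem pred_eq (p g : Int) (hp : 3 ≤ p) :
    (let phi := p - 1
     let fr := factorA phi 2
     let factors := if fr.1 > 1 then fr.2 ++ [fr.1] else fr.2
     factors.all (fun f => decide (pyPowMod g (PySem.Int.floordiv phi f) p ≠ 1)))
    = (proper_divisors (p - 1)).all (fun m => decide (pyPowMod g m p ≠ 1)) := by
  set phi := p - 1 with hphi
  have hphi2 : 2 ≤ phi := by omega
  have hsound := factorA_sound phi 2 (by omega) (le_refl 2)
  have hfs : ∀ f, (f ∈ (if (factorA phi 2).1 > 1 then (factorA phi 2).2 ++ [(factorA phi 2).1]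
      else (factorA phi 2).2)) → 2 ≤ f ∧ f ∣ phi := by
    intro f hf
    by_cases hres : (factorA phi 2).1 > 1
    · rw [if_pos hres] at hf
      rcases List.mem_append.mp hf with h1 | h1
      · exact hsound.1 f h1
      · have : f = (factorA phi 2).1 := by simpa using h1
        exact ⟨by omega, this ▸ hsound.2.1⟩
    · rw [if_neg hres] at hf
      exact hsound.1 f hf
  have hcomp : ∀ q : Int, 2 ≤ q → Prime q → q ∣ phi →
      q ∈ (if (factorA phi 2).1 > 1 then (factorA phi 2).2 ++ [(factorA phi 2).1]
        else (factorA phi 2).2) := by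
    intro q hq2 hq hqd
    rcases factorA_complete phi 2 q (by omega) (le_refl 2) (by intro e he1 he2; omega) hq2 hq hqd
      with h1 | h1
    · by_cases hres : (factorA phi 2).1 > 1
      · rw [if_pos hres]; exact List.mem_append.mpr (Or.inl h1)
      · rw [if_neg hres]; exact h1
    · have hres : (factorA phi 2).1 > 1 := by rw [← h1]; omega
      rw [if_pos hres]
      exact List.mem_append.mpr (Or.inr (by simp [h1]))
  -- the two all-tests are equivalent
  have hiff : (∀ f ∈ (if (factorA phi 2).1 > 1 then (factorA phi 2).2 ++ [(factorA phi 2).1]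
        else (factorA phi 2).2), pyPowMod g (PySem.Int.floordiv phi f) p ≠ 1)
      ↔ (∀ m ∈ proper_divisors phi, pyPowMod g m p ≠ 1) := by
    constructor
    · -- A-all → B-all, by contraposition through the least prime factor of phi / m
      intro hA m hm
      rcases (proper_divisors_mem phi (by omega) m).mp hm with ⟨hm1, hm2, hm3⟩
      intro hpow1
      rcases hm3 with ⟨s, hs⟩
      have hs2 : 2 ≤ s := by nlinarith
      set q : Int := (s.natAbs.minFac : Int) with hqdef
      have hqprime : s.natAbs.minFac.Prime := Nat.minFac_prime (by omega)
      have hq2 : 2 ≤ q := by rw [hqdef]; exact_mod_cast hqprime.two_le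
      have hqp : Prime q := Nat.prime_iff_prime_int.mp hqprime
      have hqs : q ∣ s := by
        have : (s.natAbs.minFac : Int) ∣ (s.natAbs : Int) :=
          Int.natCast_dvd_natCast.mpr (Nat.minFac_dvd _)
        rwa [Int.natAbs_of_nonneg (by omega)] at this
      have hqphi : q ∣ phi := hs ▸ (hqs.mul_left m)
      have hqmem := hcomp q hq2 hqp hqphi
      apply hA q hqmem
      -- phi // q = m * (s / q), divisible by m
      rcases hqs with ⟨u, hu⟩
      have hu1 : 1 ≤ u := by nlinarith
      have hfd : PySem.Int.floordiv phi q = phi / q := PySem.Int.floordiv_eq_ediv_of_pos (by omega)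
      have hphiq : phi / q = m * u := by
        rw [hs, hu]
        rw [show m * (q * u) = q * (m * u) by ring]
        exact Int.mul_ediv_cancel_left _ (by omega)
      have hmdvd : m ∣ PySem.Int.floordiv phi q := by
        rw [hfd, hphiq]; exact ⟨u, rfl⟩
      have hnn : 0 ≤ PySem.Int.floordiv phi q := by rw [hfd, hphiq]; nlinarith
      -- both pows have nonnegative exponents
      rw [pyPowMod, if_pos hnn]
      rw [pyPowMod, if_pos (by omega : (0:Int) ≤ m)] at hpow1
      rw [binPowMod_eq] at hpow1 ⊢
      rw [PySem.Int.powMod] at hpow1 ⊢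
      exact powMod_one_of_dvd g p m (PySem.Int.floordiv phi q) (by omega) (by omega) hnn
        hmdvd hpow1
    · -- B-all → A-all: phi // f is itself a proper divisor
      intro hB f hf
      rcases hfs f hf with ⟨hf2, hfd⟩
      have hfd' : PySem.Int.floordiv phi f = phi / f := PySem.Int.floordiv_eq_ediv_of_pos (by omega)
      rcases hfd with ⟨m, hm⟩
      have hm1 : 1 ≤ m := by nlinarith
      have hphif : phi / f = m := by rw [hm]; exact Int.mul_ediv_cancel_left m (by omega)
      have hmem : PySem.Int.floordiv phi f ∈ proper_divisors phi := by
        rw [proper_divisors_mem phi (by omega), hfd', hphif]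
        exact ⟨hm1, by nlinarith, ⟨f, by rw [hm]; ring⟩⟩
      exact hB _ hmem
  -- conclude equality of the booleans
  simp only []
  cases hA : (if (factorA phi 2).1 > 1 then (factorA phi 2).2 ++ [(factorA phi 2).1]
      else (factorA phi 2).2).all (fun f => decide (pyPowMod g (PySem.Int.floordiv phi f) p ≠ 1))
    with
  | true =>
      have h1 := List.all_eq_true.mp hA
      simp only [decide_eq_true_eq] at h1
      have h2 := hiff.mp h1
      exact (List.all_eq_true.mpr (by intro m hm; exact decide_eq_true (h2 m hm))).symm
  | false =>
      by_contra hB'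
      have hB2 : (proper_divisors phi).all (fun m => decide (pyPowMod g m p ≠ 1)) = true := by
        cases h : (proper_divisors phi).all (fun m => decide (pyPowMod g m p ≠ 1))
        · rw [h] at hB'; exact absurd rfl hB'
        · rfl
      have h1 := List.all_eq_true.mp hB2
      simp only [decide_eq_true_eq] at h1
      have h2 := hiff.mpr h1
      have : (if (factorA phi 2).1 > 1 then (factorA phi 2).2 ++ [(factorA phi 2).1]
          else (factorA phi 2).2).all (fun f => decide (pyPowMod g (PySem.Int.floordiv phi f) p ≠ 1)) = true :=
        List.all_eq_true.mpr (by intro f hf; exact decide_eq_true (h2 f hf))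
      rw [hA] at this
      exact absurd this (by simp)

theorem primitive_root_eq (p : Int) : primitive_root p = primitive_root_alt p := by
  rw [primitive_root, primitive_root_alt]
  by_cases hp2 : p = 2
  · rw [if_pos hp2, if_pos hp2]
  · rw [if_neg hp2, if_neg hp2]
    by_cases hp3 : 3 ≤ p
    · exact search_eq (p - 1) p _ _ (fun g => pred_eq p g hp3) 2
    · rw [searchA, if_neg (by omega), searchB, if_neg (by omega)]

theorem primitive_root_alt_neg (p : Int) (hp : p ≤ 0) : primitive_root_alt p = -1 := by
  rw [primitive_root_alt, if_neg (show ¬ p = 2 by omega)]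
  rw [searchB, if_neg (by omega)]

theorem powMod_congr (b b' : Int) (n : Nat) (m : Int) (h : m ∣ (b - b')) :
    PySem.Int.powMod b n m = PySem.Int.powMod b' n m := by
  rw [PySem.Int.powMod, PySem.Int.powMod]
  exact mod_congr _ _ m (dvd_trans h (sub_dvd_pow_sub_pow b b' n))

theorem extended_gcd_bezout (a b : Int) :
    a * (extended_gcd a b).2.1 + b * (extended_gcd a b).2.2 = (extended_gcd a b).1 := by
  induction a, b using extended_gcd.induct with
  | case1 a => rw [extended_gcd, dif_pos rfl]; ring
  | case2 a b hb ih =>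
      have hm : PySem.Int.mod a b = a - PySem.Int.floordiv a b * b := by
        have := PySem.Int.floordiv_mul_add_mod a b; linarith
      rw [extended_gcd, dif_neg hb]
      linear_combination ih - (extended_gcd b (PySem.Int.mod a b)).2.2 * hm

theorem extended_gcd_natAbs (a b : Int) : (extended_gcd a b).1.natAbs = Int.gcd a b := by
  induction a, b using extended_gcd.induct with
  | case1 a => rw [extended_gcd, dif_pos rfl]; simp [Int.gcd_zero_right]
  | case2 a b hb ih =>
      have hm : PySem.Int.mod a b = a - PySem.Int.floordiv a b * b := by
        have := PySem.Int.floordiv_mul_add_mod a b; linarith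
      rw [extended_gcd, dif_neg hb]
      show (extended_gcd b (PySem.Int.mod a b)).1.natAbs = _
      rw [ih, hm]
      rw [show a - PySem.Int.floordiv a b * b = a - b * PySem.Int.floordiv a b by ring]
      rw [Int.gcd_sub_mul_left_right, Int.gcd_comm]

theorem extended_gcd_nonneg : ∀ (a b : Int), 0 ≤ a → 0 ≤ b → 0 ≤ (extended_gcd a b).1 := by
  intro a b
  induction a, b using extended_gcd.induct with
  | case1 a => intro ha _; rw [extended_gcd, dif_pos rfl]; exact ha
  | case2 a b hb ih =>
      intro ha hb'
      rw [extended_gcd, dif_neg hb]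
      exact ih hb' (PySem.Int.mod_nonneg a (by omega))

theorem gcdA_inv (a m : Int) (h : Int.gcd a m = 1) : m ∣ (a * Int.gcdA a m - 1) := by
  have hb := Int.gcd_eq_gcd_ab a m
  rw [h] at hb
  exact ⟨-Int.gcdB a m, by push_cast at hb; linarith⟩

theorem coprime_cancel (a m t : Int) (h : Int.gcd a m = 1) (hd : m ∣ a * t) : m ∣ t := by
  have hco : IsCoprime m a := by
    rw [Int.isCoprime_iff_gcd_eq_one, Int.gcd_comm]; exact h
  exact hco.dvd_of_dvd_mul_left hd

theorem pyPowMod_neg_one_eq (a m : Int) :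
    pyPowMod a (-1) m = PySem.Int.mod (Int.gcdA a m) m := by
  rw [pyPowMod, if_neg (by norm_num)]
  rw [binPowMod_eq, PySem.Int.powMod]
  norm_num
  exact mod_congr _ _ m (mod_sub_dvd (Int.gcdA a m) m)

theorem k0_eq_pos (a mv bv : Int) (ha : 0 ≤ a) (hmv : 0 ≤ mv) (hg : Int.gcd a mv = 1) :
    PySem.Int.mod ((extended_gcd a mv).2.1 * bv) mv
      = PySem.Int.mod (pyPowMod a (-1) mv * bv) mv := by
  have hbez := extended_gcd_bezout a mv
  have hna := extended_gcd_natAbs a mv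
  have hnn := extended_gcd_nonneg a mv ha hmv
  have hg1 : (extended_gcd a mv).1 = 1 := by rw [hg] at hna; omega
  have h1 : mv ∣ a * (extended_gcd a mv).2.1 - 1 :=
    ⟨-(extended_gcd a mv).2.2, by rw [hg1] at hbez; linarith⟩
  have h2 := gcdA_inv a mv hg
  have h3 : mv ∣ a * ((extended_gcd a mv).2.1 - Int.gcdA a mv) := by
    have h4 := dvd_sub h1 h2
    have : a * (extended_gcd a mv).2.1 - 1 - (a * Int.gcdA a mv - 1)
        = a * ((extended_gcd a mv).2.1 - Int.gcdA a mv) := by ring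
    rwa [this] at h4
  have h4 : mv ∣ ((extended_gcd a mv).2.1 - Int.gcdA a mv) := coprime_cancel a mv _ hg h3
  rw [pyPowMod_neg_one_eq]
  apply mod_congr
  have h5 := mod_sub_self_dvd (Int.gcdA a mv) mv
  have h6 : mv ∣ ((extended_gcd a mv).2.1 - PySem.Int.mod (Int.gcdA a mv) mv) := by
    have h7 := dvd_add h4 (mod_sub_self_dvd (Int.gcdA a mv) mv)
    have heq : ((extended_gcd a mv).2.1 - Int.gcdA a mv)
        + (Int.gcdA a mv - PySem.Int.mod (Int.gcdA a mv) mv)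
        = (extended_gcd a mv).2.1 - PySem.Int.mod (Int.gcdA a mv) mv := by ring
    rwa [heq] at h7
  have := dvd_mul_of_dvd_left h6 bv
  rwa [sub_mul] at this

theorem k0_parity (a mv bv : Int) (h2mv : 2 ∣ mv) (hg : Int.gcd a mv = 1) :
    2 ∣ (PySem.Int.mod ((extended_gcd a mv).2.1 * bv) mv
          - PySem.Int.mod (pyPowMod a (-1) mv * bv) mv) := by
  have hbez := extended_gcd_bezout a mv
  have hna := extended_gcd_natAbs a mv
  rw [hg] at hna
  set x := (extended_gcd a mv).2.1 with hx
  set y := (extended_gcd a mv).2.2 with hy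
  set s := (extended_gcd a mv).1 with hs
  set gA := Int.gcdA a mv with hgA
  have hs1 : s = 1 ∨ s = -1 := by omega
  have h1 : mv ∣ a * x - s := ⟨-y, by linarith⟩
  have h2 : mv ∣ a * gA - 1 := gcdA_inv a mv hg
  have h3 : mv ∣ a * (x - s * gA) := by
    rcases hs1 with h | h
    · have := dvd_sub h1 (dvd_mul_of_dvd_right h2 s)
      have heq : a * x - s - s * (a * gA - 1) = a * (x - s * gA) := by rw [h]; ring
      rwa [heq] at this
    · have := dvd_sub h1 (dvd_mul_of_dvd_right h2 s)
      have heq : a * x - s - s * (a * gA - 1) = a * (x - s * gA) := by rw [h]; ring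
      rwa [heq] at this
  have h4 : mv ∣ (x - s * gA) := coprime_cancel a mv _ hg h3
  have h5 : (2:Int) ∣ (x - s * gA) := dvd_trans h2mv h4
  have h6 : (2:Int) ∣ (x - gA) := by rcases hs1 with h | h <;> rw [h] at h5 <;> omega
  rw [pyPowMod_neg_one_eq]
  have h7 : (2:Int) ∣ (PySem.Int.mod gA mv - gA) := dvd_trans h2mv (mod_sub_dvd gA mv)
  have h8 : (2:Int) ∣ (x * bv - PySem.Int.mod gA mv * bv) := by
    have : (2:Int) ∣ (x - PySem.Int.mod gA mv) := by omega
    have := dvd_mul_of_dvd_left this bv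
    rwa [sub_mul] at this
  have h9 : (2:Int) ∣ (PySem.Int.mod (x * bv) mv - x * bv) := dvd_trans h2mv (mod_sub_dvd _ mv)
  have h10 : (2:Int) ∣ (PySem.Int.mod gA mv * bv - PySem.Int.mod (PySem.Int.mod gA mv * bv) mv) :=
    dvd_trans h2mv (mod_sub_self_dvd _ mv)
  have hsum := dvd_add (dvd_add h9 h8) h10
  have heq : (PySem.Int.mod (x * bv) mv - x * bv) + (x * bv - PySem.Int.mod gA mv * bv)
      + (PySem.Int.mod gA mv * bv - PySem.Int.mod (PySem.Int.mod gA mv * bv) mv)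
      = PySem.Int.mod (x * bv) mv - PySem.Int.mod (PySem.Int.mod gA mv * bv) mv := by ring
  rwa [heq] at hsum

theorem pyPowMod_neg_one_base (e p : Int) (hp : p ≠ 0) :
    pyPowMod (-1) e p = if 2 ∣ e then PySem.Int.mod 1 p else PySem.Int.mod (-1) p := by
  have hval : ∀ n : Nat, ((-1 : Int) ^ n) = if n % 2 = 0 then 1 else -1 := by
    intro n
    rcases Nat.even_or_odd n with h | h
    · rw [Even.neg_one_pow h, if_pos (Nat.even_iff.mp h)]
    · rw [Odd.neg_one_pow h, if_neg (by have := Nat.odd_iff.mp h; omega)]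
  rw [pyPowMod]
  by_cases he : 0 ≤ e
  · rw [if_pos he, binPowMod_eq, PySem.Int.powMod, hval]
    by_cases h2 : 2 ∣ e
    · rw [if_pos (by omega), if_pos h2]
    · rw [if_neg (by omega), if_neg h2]
  · rw [if_neg he]
    have hgcd : Int.gcd (-1) p = 1 := by simp [Int.gcd]
    have h2 := gcdA_inv (-1) p hgcd
    have hc : p ∣ (PySem.Int.mod (Int.gcdA (-1) p) p - (-1)) := by
      have ha := mod_sub_dvd (Int.gcdA (-1) p) p
      have hb : p ∣ (Int.gcdA (-1) p - (-1)) := by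
        have : (-1 : Int) * Int.gcdA (-1) p - 1 = -(Int.gcdA (-1) p - (-1)) + (-2) * 0 := by ring
        rcases h2 with ⟨c, hcc⟩
        exact ⟨-c, by linarith⟩
      rcases ha with ⟨c1, hc1⟩; rcases hb with ⟨c2, hc2⟩
      exact ⟨c1 + c2, by linarith⟩
    rw [binPowMod_eq, powMod_congr _ (-1) _ p hc, PySem.Int.powMod, hval]
    by_cases h2e : 2 ∣ e
    · rw [if_pos (by omega), if_pos h2e]
    · rw [if_neg (by omega), if_neg h2e]

theorem two_dvd_of_c_ne (m : Int) (h : ((Int.gcd 30 m : Int) - (Int.gcd 15 m : Int)) ≠ 0) :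
    2 ∣ m := by
  by_contra h2
  apply h
  have hodd : Nat.Coprime 2 m.natAbs := by
    rw [Nat.coprime_two_left, Nat.odd_iff]
    omega
  have : Nat.gcd 30 m.natAbs = Nat.gcd 15 m.natAbs := by
    have h30 : (30 : Nat) = 2 * 15 := rfl
    rw [h30, Nat.Coprime.gcd_mul_left_cancel 15 hodd]
  have hg : Int.gcd 30 m = Int.gcd 15 m := by
    unfold Int.gcd
    simpa using this
  rw [hg]; ring

theorem countA_eq (l : List Int) (init rem : Int) :
    (PySem.List.sorted l (fun x => x) false).foldl
      (fun cnt r => if r = 0 then cnt else if r ≤ rem then cnt + 1 else cnt) init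
      = init + (l.countP (fun r => decide (r ≠ 0 ∧ r ≤ rem)) : Int) := by
  have hbody : (fun (cnt : Int) (r : Int) =>
      if r = 0 then cnt else if r ≤ rem then cnt + 1 else cnt)
      = (fun (cnt : Int) (r : Int) => if (r ≠ 0 ∧ r ≤ rem) then cnt + 1 else cnt) := by
    funext cnt r
    by_cases h0 : r = 0
    · simp [h0]
    · by_cases h1 : r ≤ rem <;> simp [h0, h1]
  rw [hbody, PySem.List.foldl_ite_add_one]
  rw [(PySem.List.sorted_perm l (fun x => x) false).countP_eq]

-- ===== VERDICT (by name: the statement is the Claim_ definition above) =====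
theorem solve_for_prime_spec : Claim_equal_solve_for_prime := by
  intro p N _ hp1
  unfold Pre_solve_for_prime at hp1
  unfold Spec_solve_for_prime
  by_cases hp2 : p = 2
  · simp only [solve_for_prime, solve_for_prime_alt, if_pos hp2]
  · simp only [solve_for_prime, solve_for_prime_alt, if_neg hp2]
    by_cases hc : (Int.gcd 30 (p - 1) : Int) - (Int.gcd 15 (p - 1) : Int) = 0
    · rw [if_pos hc, if_pos hc]
    · rw [if_neg hc, if_neg hc]
      by_cases hm : PySem.Int.mod (PySem.Int.floordiv (p - 1) 2) (Int.gcd 15 (p - 1) : Int) = 0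
      · rw [if_neg (by simpa using hm), if_neg (by simpa using hm)]
        -- deep branch
        rw [PySem.List.foldl_append_singleton_eq_map, List.nil_append, countA_eq]
        have hdpos : (0:Int) < (Int.gcd 15 (p - 1) : Int) := by
          exact_mod_cast Int.gcd_pos_iff.mpr (Or.inl (by norm_num))
        have hfd15 : PySem.Int.floordiv 15 (Int.gcd 15 (p - 1) : Int)
            = 15 / (Int.gcd 15 (p - 1) : Int) := PySem.Int.floordiv_eq_ediv_of_pos hdpos
        have hfdpm : PySem.Int.floordiv (p - 1) (Int.gcd 15 (p - 1) : Int)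
            = (p - 1) / (Int.gcd 15 (p - 1) : Int) := PySem.Int.floordiv_eq_ediv_of_pos hdpos
        have hgcd1 : Int.gcd (PySem.Int.floordiv 15 (Int.gcd 15 (p - 1) : Int))
            (PySem.Int.floordiv (p - 1) (Int.gcd 15 (p - 1) : Int)) = 1 := by
          rw [hfd15, hfdpm]
          exact Int.gcd_div_gcd_div_gcd (by exact_mod_cast hdpos)
        by_cases hppos : 0 < p
        · -- p ≥ 3 : the two k0 computations agree exactly
          have hp3 : 3 ≤ p := by omega
          have hk0 := k0_eq_pos (PySem.Int.floordiv 15 (Int.gcd 15 (p - 1) : Int))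
            (PySem.Int.floordiv (p - 1) (Int.gcd 15 (p - 1) : Int))
            (PySem.Int.floordiv (PySem.Int.floordiv (p - 1) 2) (Int.gcd 15 (p - 1) : Int))
            (by rw [hfd15]; positivity)
            (by rw [hfdpm]; exact Int.ediv_nonneg (by omega) (by omega))
            hgcd1
          rw [primitive_root_eq, hk0]
        · -- p ≤ -1 : generator is -1 and the two k0 values share parity
          have hdvd2 : (2:Int) ∣ (p - 1) := two_dvd_of_c_ne (p - 1) hc
          have hple : p ≤ -1 := by omega
          have hd15 : (Int.gcd 15 (p - 1) : Int) ∣ 15 := Int.gcd_dvd_left 15 (p - 1)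
          have hdodd : ¬ (2:Int) ∣ (Int.gcd 15 (p - 1) : Int) := by
            intro h2; have : (2:Int) ∣ 15 := h2.trans hd15; omega
          have hdpm : (Int.gcd 15 (p - 1) : Int) ∣ (p - 1) := Int.gcd_dvd_right 15 (p - 1)
          have hmvmul : ((p - 1) / (Int.gcd 15 (p - 1) : Int)) * (Int.gcd 15 (p - 1) : Int)
              = p - 1 := Int.ediv_mul_cancel hdpm
          have hmv2 : (2:Int) ∣ PySem.Int.floordiv (p - 1) (Int.gcd 15 (p - 1) : Int) := by
            rw [hfdpm]
            rcases (Int.prime_two.dvd_mul).mp (show (2:Int) ∣ ((p - 1) / (Int.gcd 15 (p - 1) : Int)) * (Int.gcd 15 (p - 1) : Int) by rw [hmvmul]; exact hdvd2) with h | h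
            · exact h
            · exact absurd h hdodd
          have hpar := k0_parity (PySem.Int.floordiv 15 (Int.gcd 15 (p - 1) : Int))
            (PySem.Int.floordiv (p - 1) (Int.gcd 15 (p - 1) : Int))
            (PySem.Int.floordiv (PySem.Int.floordiv (p - 1) 2) (Int.gcd 15 (p - 1) : Int))
            hmv2 hgcd1
          have hgneg : primitive_root p = -1 := by
            rw [primitive_root_eq]; exact primitive_root_alt_neg p (by omega)
          have hgnegB : primitive_root_alt p = -1 := primitive_root_alt_neg p (by omega)
          rw [hgneg, hgnegB]
          -- pointwise equality of the two residue lists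
          have hmap : ∀ t : Int,
              pyPowMod (-1) (PySem.Int.mod
                  (PySem.Int.mod ((extended_gcd (PySem.Int.floordiv 15 (Int.gcd 15 (p - 1) : Int)) (PySem.Int.floordiv (p - 1) (Int.gcd 15 (p - 1) : Int))).2.1 * PySem.Int.floordiv (PySem.Int.floordiv (p - 1) 2) (Int.gcd 15 (p - 1) : Int)) (PySem.Int.floordiv (p - 1) (Int.gcd 15 (p - 1) : Int))
                   + t * PySem.Int.floordiv (p - 1) (Int.gcd 15 (p - 1) : Int)) (p - 1)) p
              = pyPowMod (-1) (PySem.Int.mod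
                  (PySem.Int.mod (pyPowMod (PySem.Int.floordiv 15 (Int.gcd 15 (p - 1) : Int)) (-1) (PySem.Int.floordiv (p - 1) (Int.gcd 15 (p - 1) : Int)) * PySem.Int.floordiv (PySem.Int.floordiv (p - 1) 2) (Int.gcd 15 (p - 1) : Int)) (PySem.Int.floordiv (p - 1) (Int.gcd 15 (p - 1) : Int))
                   + t * PySem.Int.floordiv (p - 1) (Int.gcd 15 (p - 1) : Int)) (p - 1)) p := by
            intro t
            set k0A := PySem.Int.mod ((extended_gcd (PySem.Int.floordiv 15 (Int.gcd 15 (p - 1) : Int)) (PySem.Int.floordiv (p - 1) (Int.gcd 15 (p - 1) : Int))).2.1 * PySem.Int.floordiv (PySem.Int.floordiv (p - 1) 2) (Int.gcd 15 (p - 1) : Int)) (PySem.Int.floordiv (p - 1) (Int.gcd 15 (p - 1) : Int)) with hk0A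
            set k0B := PySem.Int.mod (pyPowMod (PySem.Int.floordiv 15 (Int.gcd 15 (p - 1) : Int)) (-1) (PySem.Int.floordiv (p - 1) (Int.gcd 15 (p - 1) : Int)) * PySem.Int.floordiv (PySem.Int.floordiv (p - 1) 2) (Int.gcd 15 (p - 1) : Int)) (PySem.Int.floordiv (p - 1) (Int.gcd 15 (p - 1) : Int)) with hk0B
            set eA := PySem.Int.mod (k0A + t * PySem.Int.floordiv (p - 1) (Int.gcd 15 (p - 1) : Int)) (p - 1) with heA
            set eB := PySem.Int.mod (k0B + t * PySem.Int.floordiv (p - 1) (Int.gcd 15 (p - 1) : Int)) (p - 1) with heB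
            have hpne : p ≠ 0 := by omega
            have h1 : (2:Int) ∣ (eA - (k0A + t * PySem.Int.floordiv (p - 1) (Int.gcd 15 (p - 1) : Int))) :=
              hdvd2.trans (mod_sub_dvd _ _)
            have h2 : (2:Int) ∣ ((k0B + t * PySem.Int.floordiv (p - 1) (Int.gcd 15 (p - 1) : Int)) - eB) :=
              hdvd2.trans (mod_sub_self_dvd _ _)
            have h3 : (2:Int) ∣ (eA - eB) := by
              have h4 := dvd_add (dvd_add h1 hpar) h2
              have heq : (eA - (k0A + t * PySem.Int.floordiv (p - 1) (Int.gcd 15 (p - 1) : Int)))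
                  + (k0A - k0B)
                  + ((k0B + t * PySem.Int.floordiv (p - 1) (Int.gcd 15 (p - 1) : Int)) - eB)
                  = eA - eB := by ring
              rwa [heq] at h4
            rw [pyPowMod_neg_one_base eA p hpne, pyPowMod_neg_one_base eB p hpne]
            by_cases h2e : (2:Int) ∣ eA
            · rw [if_pos h2e, if_pos (by omega)]
            · rw [if_neg h2e, if_neg (by omega)]
          rw [List.map_congr_left (fun t _ => hmap t)]
      · rw [if_pos (by simpa using hm), if_pos (by simpa using hm)]
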